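-- pv_equiv track=rewrite | github.com/0-0Jay/algorithm | Algorithm_GroupStudy/프로그래머스/emoticonSale.py | solution
-- ===== SOURCE A (Python) =====
-- from collections import deque
--
-- def solution(users, emoticons):
--     que = deque([[]])
--     plus, money = 0, 0
--     while que:
--         rate = que.popleft()
--         if len(rate) == len(emoticons):
--             p, m = 0, 0
--             for s, lim in users:
--                 total = 0
--                 for i in range(len(rate)):
--                     if rate[i] >= s:
--                         total += emoticons[i] * (100 - rate[i]) // 100
--                     if total >= lim: break
--                 if total >= lim:
--                     p += 1
--                 else:
--                     m += total
--             if p > plus or p == plus and m > money: plus, money = p, m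
--             continue
--
--         for i in range(10, 41, 10):
--             que.append(rate + [i])
--
--     return [plus, money]
-- ===== SOURCE B (Python) =====
-- def solution(users, emoticons):
--     # DFS over emoticon positions carrying per-user (running total, locked) states,
--     # so each user's discounted sum is accumulated incrementally along shared prefixes
--     # instead of being recomputed from scratch for every complete rate vector.
--     def advance(states, e, r):
--         out = []
--         for (s, lim), (total, done) in zip(users, states):
--             if not done:
--                 if r >= s:
--                     total += e * (100 - r) // 100
--                 if total >= lim:
--                     done = True
--             out.append((total, done))
--         return out
--
--     def leaf(states):
--         p = m = 0
--         for (_, lim), (total, _) in zip(users, states):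
--             if total >= lim:
--                 p += 1
--             else:
--                 m += total
--         return (p, m)
--
--     def dfs(emos, states):
--         if not emos:
--             return leaf(states)
--         return max(dfs(emos[1:], advance(states, emos[0], r)) for r in (10, 20, 30, 40))
--
--     best = max((0, 0), dfs(emoticons, [(0, False)] * len(users)))
--     return [best[0], best[1]]
-- ===== Notes on version B (the rewrite author's own statement) =====
-- stated objective: alternative
-- what changed: Replaces A's deque-driven breadth-first generation of complete rate vectors each rescored by an inner loop over all emoticons with a depth-first recursion over emoticon positions that carries per-user (running total, locked) states, so discounted sums are accumulated incrementally and shared across the 4 branches of each prefix, and the best (p, m) pair is taken as a lexicographic max up the tree.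
import Mathlib
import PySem

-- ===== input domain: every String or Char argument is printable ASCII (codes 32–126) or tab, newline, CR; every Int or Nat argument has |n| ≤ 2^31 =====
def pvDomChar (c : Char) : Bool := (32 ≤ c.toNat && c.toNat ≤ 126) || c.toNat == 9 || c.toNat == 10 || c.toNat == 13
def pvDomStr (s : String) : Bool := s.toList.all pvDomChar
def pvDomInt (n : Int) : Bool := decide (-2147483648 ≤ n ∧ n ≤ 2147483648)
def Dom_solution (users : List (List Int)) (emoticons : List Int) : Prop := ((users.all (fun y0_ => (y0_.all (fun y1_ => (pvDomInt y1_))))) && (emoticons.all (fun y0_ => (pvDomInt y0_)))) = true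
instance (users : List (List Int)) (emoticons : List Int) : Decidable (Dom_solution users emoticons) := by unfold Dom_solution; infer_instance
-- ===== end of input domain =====

-- B replaces A's BFS over complete rate vectors (rescored from scratch by an inner loop)
-- with a DFS over emoticon positions carrying per-user (running total, locked) states,
-- sharing the accumulated sums across the four branches of each prefix (objective: alternative).

-- ===== PORT A =====

-- lemmas the port itself cites (termination of the BFS loop)
def pvW : Nat → Nat
  | 0 => 1
  | d + 1 => 1 + 4 * pvW d

theorem pvW_pos (d : Nat) : 0 < pvW d := by
  cases d <;> simp [pvW]

theorem pvRange4 : PySem.List.pyRange 10 41 10 = ([10, 20, 30, 40] : List Int) := by decide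

-- inner loop of A: `for i in range(len(rate)): …` with the early break on total >= lim
def goA (rate emo : List Int) (s lim : Int) (i : Nat) (total : Int) : Int :=
  if _h : i < rate.length then
    let total' := if PySem.List.pyGetD rate (i : Int) 0 ≥ s then
        total + PySem.Int.floordiv (PySem.List.pyGetD emo (i : Int) 0 * (100 - PySem.List.pyGetD rate (i : Int) 0)) 100
      else total
    if total' ≥ lim then total' else goA rate emo s lim (i + 1) total'
  else total
termination_by rate.length - i

-- A's per-rate evaluation: `for s, lim in users: …` accumulating (p, m)
def evalA (users : List (List Int)) (emo : List Int) (rate : List Int) : Int × Int :=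
  users.foldl (fun pm u =>
    let s := PySem.List.pyGetD u 0 0
    let lim := PySem.List.pyGetD u 1 0
    let t := goA rate emo s lim 0 0
    if t ≥ lim then (pm.1 + 1, pm.2) else (pm.1, pm.2 + t)) (0, 0)

-- the `while que:` loop; the hypothesis (all queued rates fit the emoticon count,
-- an invariant of A's execution from the seed [[]]) makes the BFS terminating
def loopA (users : List (List Int)) (emo : List Int) :
    (que : List (List Int)) → (∀ r ∈ que, r.length ≤ emo.length) → Int × Int → Int × Int
  | [], _, pm => pm
  | rate :: rest, h, pm =>
    if hf : rate.length = emo.length then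
      let pq := evalA users emo rate
      loopA users emo rest (fun r hr => h r (List.mem_cons_of_mem _ hr))
        (if pq.1 > pm.1 ∨ (pq.1 = pm.1 ∧ pq.2 > pm.2) then (pq.1, pq.2) else pm)
    else
      loopA users emo (rest ++ (PySem.List.pyRange 10 41 10).map (fun i => rate ++ [i]))
        (by
          intro r hr
          rcases List.mem_append.1 hr with h1 | h2
          · exact h r (List.mem_cons_of_mem _ h1)
          · have hrl : rate.length < emo.length :=
              lt_of_le_of_ne (h rate (List.mem_cons_self ..)) hf
            rw [pvRange4] at h2
            simp only [List.mem_map, List.mem_cons, List.not_mem_nil,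
              or_false] at h2
            obtain ⟨i, _, rfl⟩ := h2
            simpa using hrl)
        pm
termination_by que _ _ => (que.map (fun r => pvW (emo.length - r.length))).sum
decreasing_by
  · simp only [List.map_cons, List.sum_cons]
    have := pvW_pos (emo.length - rate.length)
    omega
  · have hrl : rate.length < emo.length :=
      lt_of_le_of_ne (h rate (List.mem_cons_self ..)) hf
    rw [pvRange4]
    simp only [List.map_append, List.sum_append, List.map_cons, List.sum_cons, List.map_nil,
      List.sum_nil, List.length_append, List.length_cons, List.length_nil, Nat.zero_add]
    have he : emo.length - rate.length = (emo.length - (rate.length + 1)) + 1 := by omega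
    rw [he]
    simp only [pvW]
    omega

def solution (users : List (List Int)) (emoticons : List Int) : List Int :=
  let pm := loopA users emoticons [[]]
    (by intro r hr; simp only [List.mem_singleton] at hr; subst hr; simp) (0, 0)
  [pm.1, pm.2]

-- ===== PORT B =====

-- Python's max step on int pairs: keep the accumulator unless the new item is lexicographically greater
def pyMaxB (a b : Int × Int) : Int × Int :=
  if b.1 > a.1 ∨ (b.1 = a.1 ∧ b.2 > a.2) then b else a

-- B's advance: one emoticon step of every user's (total, locked) state
def advanceB (users : List (List Int)) (states : List (Int × Bool)) (e r : Int) : List (Int × Bool) :=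
  (users.zip states).map (fun p =>
    let s := PySem.List.pyGetD p.1 0 0
    let lim := PySem.List.pyGetD p.1 1 0
    if p.2.2 then p.2
    else
      let total' := if r ≥ s then p.2.1 + PySem.Int.floordiv (e * (100 - r)) 100 else p.2.1
      (total', if total' ≥ lim then true else p.2.2))

-- B's leaf: read (p, m) off the final states
def leafB (users : List (List Int)) (states : List (Int × Bool)) : Int × Int :=
  (users.zip states).foldl (fun pm p =>
    let lim := PySem.List.pyGetD p.1 1 0
    if p.2.1 ≥ lim then (pm.1 + 1, pm.2) else (pm.1, pm.2 + p.2.1)) (0, 0)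

-- B's dfs: `max(dfs(emos[1:], advance(states, emos[0], r)) for r in (10,20,30,40))`
def dfsB (users : List (List Int)) : List Int → List (Int × Bool) → Int × Int
  | [], st => leafB users st
  | e :: es, st =>
    match ([10, 20, 30, 40] : List Int).map (fun r => dfsB users es (advanceB users st e r)) with
    | c :: cs => cs.foldl pyMaxB c
    | [] => (0, 0)  -- unreachable: the mapped literal list is nonempty (Python's max over a nonempty generator)

def solution_alt (users : List (List Int)) (emoticons : List Int) : List Int :=
  let best := pyMaxB (0, 0) (dfsB users emoticons (List.replicate users.length (0, false)))
  [best.1, best.2]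

-- ===== PRECONDITION & SPEC =====
-- Pre_ excludes only user entries that are not [s, lim] pairs, on which A's `for s, lim in users` raises ValueError.
def Pre_solution (users : List (List Int)) (emoticons : List Int) : Prop :=
  ∀ u ∈ users, u.length = 2
instance (users : List (List Int)) (emoticons : List Int) : Decidable (Pre_solution users emoticons) := by unfold Pre_solution; infer_instance

def pvWitness_solution : List (List Int) × List Int := ([[40, 100], [15, 30]], [200, 7000])

def Spec_solution (users : List (List Int)) (emoticons : List Int) (out : List Int) : Prop := out = solution_alt users emoticons
instance (users : List (List Int)) (emoticons : List Int) (out : List Int) : Decidable (Spec_solution users emoticons out) := by unfold Spec_solution; infer_instance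

-- ===== CLAIM (what is proved, stated in full; the proofs are below) =====
def Claim_equal_solution : Prop := ∀ (users : List (List Int)) (emoticons : List Int), Dom_solution users emoticons → Pre_solution users emoticons → Spec_solution users emoticons (solution users emoticons)

-- ===== LEMMAS AND PROOFS =====

-- proof-side helpers ------------------------------------------------------

-- all rate vectors of length n over {10,20,30,40}
def prodR : Nat → List (List Int)
  | 0 => [[]]
  | n + 1 => ([10, 20, 30, 40] : List Int).flatMap (fun i => (prodR n).map (fun t => i :: t))

-- max of a nonempty list under pyMaxB
def maxL : List (Int × Int) → Int × Int
  | [] => (0, 0)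
  | c :: cs => cs.foldl pyMaxB c

-- early-break sum over (emoticon, rate) pairs, as A's inner loop computes it
def totU (s lim : Int) : List (Int × Int) → Int → Int
  | [], total => total
  | (e, r) :: rest, total =>
    let total' := if r ≥ s then total + PySem.Int.floordiv (e * (100 - r)) 100 else total
    if total' ≥ lim then total' else totU s lim rest total'

-- one user's state step, exactly advanceB's body
def stepU (s lim : Int) (st : Int × Bool) (p : Int × Int) : Int × Bool :=
  if st.2 then st
  else
    let total' := if p.2 ≥ s then st.1 + PySem.Int.floordiv (p.1 * (100 - p.2)) 100 else st.1
    (total', if total' ≥ lim then true else st.2)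

-- one user's state after processing the (emoticon, rate) pairs seen so far
def uState (u : List Int) (pairs : List (Int × Int)) : Int × Bool :=
  pairs.foldl (stepU (PySem.List.pyGetD u 0 0) (PySem.List.pyGetD u 1 0)) (0, false)

theorem pyMaxB_assoc (a b c : Int × Int) :
    pyMaxB (pyMaxB a b) c = pyMaxB a (pyMaxB b c) := by
  obtain ⟨a1, a2⟩ := a; obtain ⟨b1, b2⟩ := b; obtain ⟨c1, c2⟩ := c
  simp only [pyMaxB]
  split_ifs <;> simp_all [Prod.ext_iff] <;> omega

theorem foldl_pyMaxB_out (z : Int × Int) :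
    ∀ (cs : List (Int × Int)) (c : Int × Int),
      cs.foldl pyMaxB (pyMaxB z c) = pyMaxB z (cs.foldl pyMaxB c) := by
  intro cs
  induction cs with
  | nil => intro c; rfl
  | cons x xs ih => intro c; simp only [List.foldl_cons, pyMaxB_assoc, ih]

theorem maxL_append : ∀ (a b : List (Int × Int)), a ≠ [] → b ≠ [] →
    maxL (a ++ b) = pyMaxB (maxL a) (maxL b) := by
  intro a b ha hb
  match a, b with
  | x :: xs, y :: ys =>
    simp only [maxL, List.cons_append, List.foldl_append, List.foldl_cons]
    rw [foldl_pyMaxB_out]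

theorem prodR_ne_nil (n : Nat) : prodR n ≠ [] := by
  induction n with
  | zero => simp [prodR]
  | succ n ih =>
    simp only [prodR, List.flatMap_cons, ne_eq, List.append_eq_nil_iff, List.map_eq_nil_iff]
    intro h
    exact ih h.1

theorem length_mem_prodR : ∀ (n : Nat) (r : List Int), r ∈ prodR n → r.length = n := by
  intro n
  induction n with
  | zero => intro r hr; simp [prodR] at hr; simp [hr]
  | succ n ih =>
    intro r hr
    simp only [prodR, List.mem_flatMap, List.mem_map] at hr
    obtain ⟨i, _, t, ht, rfl⟩ := hr
    simp [ih t ht]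

-- A's inner loop equals totU on the zipped suffix
theorem goA_eq_totU (emo : List Int) (s lim : Int) (k : Nat) :
    ∀ (rate : List Int) (j : Nat) (total : Int), rate.length ≤ emo.length →
      rate.length - j ≤ k →
      goA rate emo s lim j total = totU s lim ((emo.zip rate).drop j) total := by
  induction k with
  | zero =>
    intro rate j total hle hk
    have hj : ¬ j < rate.length := by omega
    rw [goA, dif_neg hj, List.drop_eq_nil_of_le (by simp; omega)]
    rfl
  | succ k ih =>
    intro rate j total hle hk
    rw [goA]
    by_cases hj : j < rate.length
    · have hje : j < emo.length := by omega
      have hjz : j < (emo.zip rate).length := by simp; omega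
      rw [dif_pos hj, List.drop_eq_getElem_cons hjz, List.getElem_zip]
      simp only [totU]
      have h1 : PySem.List.pyGetD rate (j : Int) 0 = rate[j] := by
        rw [PySem.List.pyGetD_natCast]; exact List.getD_eq_getElem _ _ hj
      have h2 : PySem.List.pyGetD emo (j : Int) 0 = emo[j] := by
        rw [PySem.List.pyGetD_natCast]; exact List.getD_eq_getElem _ _ hje
      rw [h1, h2]
      set total' := if rate[j] ≥ s then
          total + PySem.Int.floordiv (emo[j] * (100 - rate[j])) 100 else total with ht
      by_cases hb : total' ≥ lim
      · simp only [if_pos hb]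
      · simp only [if_neg hb]
        exact ih rate (j + 1) total' hle (by omega)
    · have hj2 : rate.length ≤ j := by omega
      rw [dif_neg hj, List.drop_eq_nil_of_le (by simp; omega)]
      rfl

-- a locked state never changes
theorem foldl_stepU_locked (s lim : Int) :
    ∀ (pairs : List (Int × Int)) (t : Int),
      pairs.foldl (stepU s lim) (t, true) = (t, true) := by
  intro pairs
  induction pairs with
  | nil => intro t; rfl
  | cons p ps ih => intro t; simp only [List.foldl_cons, stepU, if_pos]; exact ih t

-- the running total of the state fold is the early-break sum
theorem fst_foldl_stepU (s lim : Int) :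
    ∀ (pairs : List (Int × Int)) (t : Int),
      (pairs.foldl (stepU s lim) (t, false)).1 = totU s lim pairs t := by
  intro pairs
  induction pairs with
  | nil => intro t; rfl
  | cons p ps ih =>
    intro t
    obtain ⟨e, r⟩ := p
    simp only [List.foldl_cons, stepU, totU, Bool.false_eq_true, if_false]
    set t' := if r ≥ s then t + PySem.Int.floordiv (e * (100 - r)) 100 else t with ht
    by_cases hb : t' ≥ lim
    · simp only [if_pos hb, foldl_stepU_locked]
    · simp only [if_neg hb]
      exact ih t'

-- zip of a list with its own map, folded / mapped pointwise
theorem zip_map_self_map {α β γ : Type} (f : α → β) (F : α × β → γ) :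
    ∀ (l : List α), ((l.zip (l.map f)).map F) = l.map (fun u => F (u, f u)) := by
  intro l
  induction l with
  | nil => rfl
  | cons x xs ih => simp only [List.map_cons, List.zip_cons_cons, ih]

theorem zip_map_self_foldl {α β γ : Type} (f : α → β) (F : γ → α × β → γ) (z : γ) :
    ∀ (l : List α), ((l.zip (l.map f)).foldl F z) = l.foldl (fun z u => F z (u, f u)) z := by
  intro l
  induction l generalizing z with
  | nil => rfl
  | cons x xs ih => simp only [List.map_cons, List.zip_cons_cons, List.foldl_cons, ih]

-- advancing map-described states appends one pair to every user's history
theorem advanceB_map (users : List (List Int)) (pairs : List (Int × Int)) (e r : Int) :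
    advanceB users (users.map (fun u => uState u pairs)) e r
      = users.map (fun u => uState u (pairs ++ [(e, r)])) := by
  unfold advanceB
  rw [zip_map_self_map]
  apply List.map_congr_left
  intro u _
  simp only [uState, List.foldl_append, List.foldl_cons, List.foldl_nil]
  rfl

-- the DFS computes the max leaf value over all completions
theorem dfsB_eq_maxL (users : List (List Int)) :
    ∀ (es : List Int) (pairs : List (Int × Int)),
      dfsB users es (users.map (fun u => uState u pairs))
        = maxL ((prodR es.length).map
            (fun t => leafB users (users.map (fun u => uState u (pairs ++ es.zip t))))) := by
  intro es
  induction es with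
  | nil =>
    intro pairs
    simp only [dfsB, List.length_nil, prodR, List.map_cons, List.map_nil, maxL,
      List.foldl_nil, List.zip_nil_left, List.append_nil]
  | cons e es ih =>
    intro pairs
    have hbranch : ∀ r : Int,
        dfsB users es (advanceB users (users.map (fun u => uState u pairs)) e r)
          = maxL ((prodR es.length).map
              (fun t => leafB users (users.map (fun u => uState u (pairs ++ (e, r) :: es.zip t))))) := by
      intro r
      rw [advanceB_map, ih (pairs ++ [(e, r)])]
      congr 1
      apply List.map_congr_left
      intro t _
      simp [List.append_assoc]
    have hne : ∀ r : Int,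
        ((prodR es.length).map
          (fun t => leafB users (users.map (fun u => uState u (pairs ++ (e, r) :: es.zip t))))) ≠ [] := by
      intro r
      simp [List.map_eq_nil_iff, prodR_ne_nil]
    -- unfold the four branches on each side
    show (match ([10, 20, 30, 40] : List Int).map
        (fun r => dfsB users es (advanceB users (users.map (fun u => uState u pairs)) e r)) with
      | c :: cs => cs.foldl pyMaxB c
      | [] => (0, 0)) = _
    simp only [List.map_cons, List.map_nil, hbranch]
    simp only [List.length_cons, prodR, List.flatMap_cons, List.flatMap_nil, List.append_nil,
      List.map_append, List.map_map]
    have hmap : ∀ r : Int,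
        ((prodR es.length).map ((fun t => leafB users (users.map (fun u =>
            uState u (pairs ++ (e :: es).zip t)))) ∘ (fun t => r :: t)))
        = ((prodR es.length).map
            (fun t => leafB users (users.map (fun u => uState u (pairs ++ (e, r) :: es.zip t))))) := by
      intro r
      apply List.map_congr_left
      intro t _
      simp [Function.comp, List.zip_cons_cons]
    rw [hmap 10, hmap 20, hmap 30, hmap 40]
    rw [maxL_append _ _ (hne 10) (by
          simp only [ne_eq, List.append_eq_nil_iff, not_and]
          intro h; exact absurd h (hne 20)),
        maxL_append _ _ (hne 20) (by
          simp only [ne_eq, List.append_eq_nil_iff, not_and]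
          intro h; exact absurd h (hne 30)),
        maxL_append _ _ (hne 30) (hne 40)]
    simp [maxL, List.foldl_cons, pyMaxB_assoc]

-- a complete leaf equals A's per-rate evaluation
theorem leafB_eq_evalA (users : List (List Int)) (emo rate : List Int)
    (hlen : rate.length ≤ emo.length) :
    leafB users (users.map (fun u => uState u (emo.zip rate))) = evalA users emo rate := by
  unfold leafB evalA
  rw [zip_map_self_foldl]
  apply PySem.List.foldl_congr_mem
  intro pm u _
  dsimp only
  have hfst : (uState u (emo.zip rate)).1
      = goA rate emo (PySem.List.pyGetD u 0 0) (PySem.List.pyGetD u 1 0) 0 0 := by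
    rw [uState, fst_foldl_stepU,
      goA_eq_totU emo _ _ rate.length rate 0 0 hlen (by omega), List.drop_zero]
  rw [hfst]

-- A's BFS loop equals a fold of pyMaxB over all completions of the queued prefixes
theorem loopA_eq (users : List (List Int)) (emo : List Int) :
    ∀ (que : List (List Int)) (h : ∀ r ∈ que, r.length ≤ emo.length) (pm : Int × Int),
      loopA users emo que h pm =
        (que.flatMap (fun r => (prodR (emo.length - r.length)).map (fun t => r ++ t))).foldl
          (fun a r => pyMaxB a (evalA users emo r)) pm := by
  intro que h pm
  induction que, h, pm using loopA.induct users emo with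
  | case1 x pm _ => simp [loopA]
  | case2 rate rest h pm hf _ _ ih =>
    simp only [loopA]
    rw [dif_pos hf]
    refine ih.trans ?_
    simp only [List.flatMap_cons, hf, Nat.sub_self, prodR, List.map_cons, List.map_nil,
      List.append_nil, List.singleton_append, List.foldl_cons]
    congr 1
  | case3 rate rest h pm hf _ ih =>
    simp only [loopA]
    rw [dif_neg hf, ih, List.flatMap_append, List.flatMap_cons]
    have hrl : rate.length < emo.length := lt_of_le_of_ne (h rate (List.mem_cons_self ..)) hf
    have hnews : ((PySem.List.pyRange 10 41 10).map (fun i => rate ++ [i])).flatMap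
        (fun r => (prodR (emo.length - r.length)).map (fun t => r ++ t))
        = (prodR (emo.length - rate.length)).map (fun t => rate ++ t) := by
      rw [pvRange4]
      have he : emo.length - rate.length = (emo.length - (rate.length + 1)) + 1 := by omega
      rw [he]
      simp [prodR, List.map_map, Function.comp_def, List.append_assoc]
    rw [hnews]
    exact List.Perm.foldl_eq
      (rcomm := ⟨fun b x y => by
        rw [pyMaxB_assoc, pyMaxB_assoc]
        congr 1
        obtain ⟨a1, a2⟩ := evalA users emo x; obtain ⟨b1, b2⟩ := evalA users emo y
        simp only [pyMaxB]
        split_ifs <;> simp_all [Prod.ext_iff] <;> omega⟩)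
      List.perm_append_comm pm

theorem replicate_eq_map_const {α β : Type} (b : β) :
    ∀ l : List α, List.replicate l.length b = l.map (fun _ => b) := by
  intro l
  induction l with
  | nil => rfl
  | cons x xs ih => simp only [List.map_cons, List.length_cons, List.replicate_succ, ih]

-- ===== VERDICT (by name: the statement is the Claim_ definition above) =====
theorem solution_spec : Claim_equal_solution := by
  unfold Claim_equal_solution
  intro users emoticons _ _
  unfold Spec_solution solution solution_alt
  rw [loopA_eq]
  simp only [List.flatMap_cons, List.flatMap_nil, List.append_nil, List.length_nil,
    Nat.sub_zero, List.nil_append, List.map_id']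
  have hinit : (List.replicate users.length ((0 : Int), false))
      = users.map (fun u => uState u []) := by
    have h0 : (fun u : List Int => uState u []) = fun _ => ((0 : Int), false) := by
      funext u; rfl
    rw [h0]
    exact replicate_eq_map_const _ users
  rw [hinit, dfsB_eq_maxL]
  have hmap : ((prodR emoticons.length).map
      (fun t => leafB users (users.map (fun u => uState u ([] ++ emoticons.zip t)))))
      = (prodR emoticons.length).map (evalA users emoticons) := by
    apply List.map_congr_left
    intro t ht
    rw [List.nil_append]
    exact leafB_eq_evalA users emoticons t (le_of_eq (length_mem_prodR _ t ht))
  rw [hmap]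
  obtain ⟨c, cs, hcs⟩ : ∃ c cs, (prodR emoticons.length).map (evalA users emoticons) = c :: cs := by
    cases hp : (prodR emoticons.length).map (evalA users emoticons) with
    | nil => exact absurd (List.map_eq_nil_iff.1 hp) (prodR_ne_nil _)
    | cons c cs => exact ⟨c, cs, rfl⟩
  have : (prodR emoticons.length).foldl (fun a r => pyMaxB a (evalA users emoticons r)) (0, 0)
      = ((prodR emoticons.length).map (evalA users emoticons)).foldl pyMaxB (0, 0) := by
    rw [List.foldl_map]
  rw [this, hcs]
  simp only [maxL, List.foldl_cons]
  rw [foldl_pyMaxB_out]
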